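-- pv_equiv track=rewrite | github.com/cabulous/leetcode | python/1960.py | manachers
-- ===== SOURCE A (Python) =====
-- def manachers(s):
--     a = '@#' + '#'.join(s) + '#$'
--     z = [0] * len(a)
--     center = right = 0
--
--     for i in range(1, len(a) - 1):
--         if i < right:
--             z[i] = min(right - i, z[2 * center - i])
--         while a[i + z[i] + 1] == a[i - z[i] - 1]:
--             z[i] += 1
--         if i + z[i] > right:
--             center = i
--             right = i + z[i]
--
--     return z[2:-2:2]
-- ===== SOURCE B (Python) =====
-- def manachers(s):
--     # naive expand-around-center over the same transformed string, odd centers only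
--     a = '@#' + '#'.join(s) + '#$'
--     out = []
--     for i in range(2, len(a) - 2, 2):
--         z = 0
--         while a[i + z + 1] == a[i - z - 1]:
--             z += 1
--         out.append(z)
--     return out
-- ===== Notes on version B (the rewrite author's own statement) =====
-- stated objective: simpler
-- what changed: Drops Manacher's z-table, mirror seeding and center/right window entirely: B naively expands around each character center of the same transformed string (O(n^2) worst case vs A's O(n)).
import Mathlib
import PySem

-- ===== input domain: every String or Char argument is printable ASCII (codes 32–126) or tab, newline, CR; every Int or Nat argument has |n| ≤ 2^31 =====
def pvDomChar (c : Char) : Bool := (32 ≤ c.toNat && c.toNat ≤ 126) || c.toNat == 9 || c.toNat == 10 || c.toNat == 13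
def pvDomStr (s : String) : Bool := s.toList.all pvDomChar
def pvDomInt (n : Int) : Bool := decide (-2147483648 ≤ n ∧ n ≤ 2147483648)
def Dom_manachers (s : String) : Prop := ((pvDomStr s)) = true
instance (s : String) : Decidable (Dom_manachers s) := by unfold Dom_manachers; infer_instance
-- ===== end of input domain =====

-- B drops Manacher's z-table / mirror seeding / center-right window and naively expands
-- around each character center of the same transformed string (objective: simpler; not faster).
-- Pre_ excludes exactly the strings on which A raises IndexError (expansion matching
-- past the end sentinel); B itself returns on part of those and raises on the rest.


-- ===== PORT A =====
-- hand-port of "'#'.join(s) + '#$'" (exact: structural recursion over the characters)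
def pvJoinA : List Char → List Char
  | [] => ['#', '$']
  | [c] => [c, '#', '$']
  | c :: d :: r => c :: '#' :: pvJoinA (d :: r)

-- the inner "while a[i+z[i]+1] == a[i-z[i]-1]: z[i] += 1"; pyGet? is Python indexing
-- (negative wraps); the `none` arm is where Python raises IndexError (outside Pre_);
-- fuel bounds the loop (a.length+1 exceeds the iteration count wherever Python terminates normally)
def pvExpandA (a : List Char) (i : Int) : Nat → Int → Int
  | 0, z => z
  | fuel + 1, z =>
    match PySem.List.pyGet? a (i + z + 1), PySem.List.pyGet? a (i - z - 1) with
    | some c1, some c2 => if c1 = c2 then pvExpandA a i fuel (z + 1) else z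
    | _, _ => z

-- one iteration of A's for-loop (state: z, center, right)
def pvStepA (a : List Char) (st : List Int × Int × Int) (i : Int) : List Int × Int × Int :=
  let z := st.1
  let center := st.2.1
  let right := st.2.2
  let z1 := if i < right then
      PySem.List.pySetD z i (min (right - i) (PySem.List.pyGetD z (2 * center - i) 0))
    else z
  let zi := pvExpandA a i (a.length + 1) (PySem.List.pyGetD z1 i 0)
  let z2 := PySem.List.pySetD z1 i zi
  if i + zi > right then (z2, i, i + zi) else (z2, center, right)

def manachers (s : String) : List Int :=
  let a : List Char := '@' :: '#' :: pvJoinA s.toList   -- a = '@#' + '#'.join(s) + '#$'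
  let z0 : List Int := List.replicate a.length 0        -- z = [0] * len(a)
  let st := (PySem.List.pyRange 1 ((a.length : Int) - 1) 1).foldl (pvStepA a) (z0, 0, 0)
  (PySem.List.slice? st.1 (some 2) (some (-2)) 2).getD []   -- z[2:-2:2]; step 2 ≠ 0, never none

-- ===== PORT B =====
-- B's "z = 0; while a[i+z+1] == a[i-z-1]: z += 1" (same pyGet? conventions as above)
def pvExpB (a : List Char) (i : Int) : Nat → Nat → Nat
  | 0, z => z
  | fuel + 1, z =>
    match PySem.List.pyGet? a (i + (z : Int) + 1), PySem.List.pyGet? a (i - (z : Int) - 1) with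
    | some c1, some c2 => if c1 = c2 then pvExpB a i fuel (z + 1) else z
    | _, _ => z

def manachers_alt (s : String) : List Int :=
  let a : List Char := '@' :: '#' :: pvJoinA s.toList   -- a = '@#' + '#'.join(s) + '#$'
  (PySem.List.pyRange 2 ((a.length : Int) - 2) 2).map   -- for i in range(2, len(a)-2, 2)
    (fun i => (pvExpB a i (a.length + 1) 0 : Int))      -- out.append(z)

-- ===== PRECONDITION & SPEC =====
-- the transformed string, built independently of the ports, for stating Pre_
def pvT (t : List Char) : List Char :=
  match t with
  | [] => ['@', '#', '#', '$']
  | _ :: _ => '@' :: '#' :: (t.flatMap (fun c => [c, '#']) ++ ['$'])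

-- Pre_ excludes exactly the strings on which A raises IndexError: those with a center i of
-- the transformed string whose expansion (with Python's negative-index wraparound on the
-- left) matches all the way past the end sentinel.  A returns on every input admitted.
def Pre_manachers (s : String) : Prop :=
  ∀ i < (pvT s.toList).length, 1 ≤ i → i + 1 < (pvT s.toList).length →
    ∃ k < (pvT s.toList).length,
      i + k + 1 < (pvT s.toList).length ∧
      PySem.List.pyGetD (pvT s.toList) ((i : Int) - (k : Int) - 1) ' ' ≠
        (pvT s.toList).getD (i + k + 1) ' '
instance (s : String) : Decidable (Pre_manachers s) := by unfold Pre_manachers; infer_instance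
def pvWitness_manachers : String := "ababa"

def Spec_manachers (s : String) (out : List Int) : Prop := out = manachers_alt s
instance (s : String) (out : List Int) : Decidable (Spec_manachers s out) := by unfold Spec_manachers; infer_instance

-- ===== CLAIM (what is proved, stated in full; the proofs are below) =====
def Claim_equal_manachers : Prop := ∀ (s : String), Dom_manachers s → Pre_manachers s → Spec_manachers s (manachers s)

-- ===== LEMMAS AND PROOFS =====

def pvA (t : List Char) : List Char := '@' :: '#' :: pvJoinA t

-- Bool match test mirroring both inner loops: does the expansion around centre i of a
-- extend past radius k (under Python indexing: left wraps, out of range is none)?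
def pvM (a : List Char) (i k : Nat) : Bool :=
  match PySem.List.pyGet? a ((i : Int) + (k : Int) + 1),
        PySem.List.pyGet? a ((i : Int) - (k : Int) - 1) with
  | some c1, some c2 => c1 == c2
  | _, _ => false

lemma pvM_ex (a : List Char) (i : Nat) : ∃ k, pvM a i k = false := by
  refine ⟨a.length, ?_⟩
  have hn : PySem.List.pyGet? a ((i : Int) + (a.length : Int) + 1) = none := by
    rw [PySem.List.pyGet?_eq_none_iff]
    intro ⟨_, h2⟩
    omega
  rw [pvM, hn]

-- the exact radius around centre i (least k whose extension fails)
def pvZ (a : List Char) (i : Nat) : Nat := Nat.find (pvM_ex a i)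

lemma pvZ_lt {a : List Char} {i k : Nat} (h : k < pvZ a i) : pvM a i k = true := by
  have := Nat.find_min (pvM_ex a i) h
  simpa using this

lemma pvZ_spec (a : List Char) (i : Nat) : pvM a i (pvZ a i) = false :=
  Nat.find_spec (pvM_ex a i)

lemma pvMatch_step {β : Type} (o1 o2 : Option Char) (f d : β) :
    (match o1, o2 with
     | some c1, some c2 => if c1 = c2 then f else d
     | _, _ => d) =
    (if (match o1, o2 with | some c1, some c2 => c1 == c2 | _, _ => false) = true then f else d) := by
  rcases o1 with _ | c1 <;> rcases o2 with _ | c2 <;> simp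

lemma pvM_iff {a : List Char} {i k : Nat} (hk : k < i) :
    pvM a i k = true ↔
      (i + k + 1 < a.length ∧ a.getD (i - k - 1) ' ' = a.getD (i + k + 1) ' ') := by
  have er : (i : Int) + (k : Int) + 1 = ((i + k + 1 : Nat) : Int) := by omega
  have el : (i : Int) - (k : Int) - 1 = ((i - k - 1 : Nat) : Int) := by omega
  rw [pvM, er, el, PySem.List.pyGet?_natCast, PySem.List.pyGet?_natCast]
  rcases h1 : a[i + k + 1]? with _ | c1
  · rw [List.getElem?_eq_none_iff] at h1
    constructor
    · intro hc
      rcases h2 : a[i - k - 1]? with _ | c2 <;> rw [h2] at hc <;> simp at hc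
    · rintro ⟨hb, -⟩
      omega
  · have hb1 : i + k + 1 < a.length := by
      by_contra hc
      rw [List.getElem?_eq_none (by omega)] at h1
      exact absurd h1 (by simp)
    have hb2 : i - k - 1 < a.length := by omega
    rw [List.getElem?_eq_getElem hb2]
    have e1 : a.getD (i + k + 1) ' ' = c1 := by
      rw [List.getD_eq_getElem?_getD, h1]; rfl
    have e2 : a.getD (i - k - 1) ' ' = a[i - k - 1] := by
      rw [List.getD_eq_getElem?_getD, List.getElem?_eq_getElem hb2]; rfl
    constructor
    · intro hc
      have hcc : c1 = a[i - k - 1] := by simpa using hc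
      exact ⟨hb1, by rw [e1, e2, hcc]⟩
    · rintro ⟨-, he⟩
      rw [e1, e2] at he
      simp [he]

-- ---------- structure of the transformed string ----------

lemma pvJoinA_ne (c : Char) (r : List Char) :
    pvJoinA (c :: r) = (c :: r).flatMap (fun x => [x, '#']) ++ ['$'] := by
  induction r generalizing c with
  | nil => rfl
  | cons d r ih => simp [pvJoinA, ih d]

-- small getD helpers
lemma pvGetD_set_self {z : List Int} {i : Nat} {v : Int} (h : i < z.length) :
    (z.set i v).getD i 0 = v := by
  rw [List.getD_eq_getElem?_getD, List.getElem?_set_self (by omega)]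
  simp

lemma pvGetD_set_ne {z : List Int} {i j : Nat} {v : Int} (h : i ≠ j) :
    (z.set i v).getD j 0 = z.getD j 0 := by
  rw [List.getD_eq_getElem?_getD, List.getElem?_set_ne h, ← List.getD_eq_getElem?_getD]

lemma pvF_len (t : List Char) : (t.flatMap (fun x => [x, '#'])).length = 2 * t.length := by
  induction t with
  | nil => rfl
  | cons c r ih => simp only [List.flatMap_cons, List.length_append, List.length_cons, ih]; simp; omega

lemma pvF_odd : ∀ (t : List Char) (j : Nat), j < t.length →
    (t.flatMap (fun x => [x, '#'])).getD (2 * j + 1) ' ' = '#' := by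
  intro t
  induction t with
  | nil => intro j h; simp at h
  | cons c r ih =>
    intro j h
    cases j with
    | zero => rfl
    | succ j =>
      have e : 2 * (j + 1) + 1 = (2 * j + 1) + 1 + 1 := by omega
      rw [e]
      simp only [List.flatMap_cons, List.cons_append, List.getD_cons_succ, List.nil_append]
      exact ih j (by simpa using h)

lemma pvA_cons (c : Char) (r : List Char) :
    pvA (c :: r) = '@' :: '#' :: ((c :: r).flatMap (fun x => [x, '#']) ++ ['$']) := by
  simp [pvA, pvJoinA_ne]

lemma pvA_len {t : List Char} (ht : t ≠ []) : (pvA t).length = 2 * t.length + 3 := by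
  cases t with
  | nil => exact absurd rfl ht
  | cons c r => rw [pvA_cons]; simp; omega

lemma pvA_odd {t : List Char} (ht : t ≠ []) {j : Nat} (hj : j ≤ t.length) :
    (pvA t).getD (2 * j + 1) ' ' = '#' := by
  cases t with
  | nil => exact absurd rfl ht
  | cons c r =>
    cases j with
    | zero => rfl
    | succ j =>
      have e : 2 * (j + 1) + 1 = (2 * j + 1) + 2 := by omega
      rw [e, pvA_cons]
      simp only [List.getD_cons_succ]
      rw [List.getD_append _ _ _ _ (by rw [pvF_len]; simp at hj ⊢; omega)]
      exact pvF_odd (c :: r) j (by simpa using hj)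

lemma pvA_last {t : List Char} (ht : t ≠ []) :
    PySem.List.pyGet? (pvA t) (-1) = some '$' := by
  cases t with
  | nil => exact absurd rfl ht
  | cons c r =>
    rw [pvA_cons, show '@' :: '#' :: ((c :: r).flatMap (fun x => [x, '#']) ++ ['$']) =
        ('@' :: '#' :: (c :: r).flatMap (fun x => [x, '#'])) ++ ['$'] by simp]
    exact PySem.List.pyGet?_neg_one_append_singleton _ _

-- ---------- basic bounds on the radius ----------

-- the expansion around any centre fails at radius i: the left index wraps to the end
-- sentinel '$' while the right index is a '#' (or out of range)
lemma pvM_self {t : List Char} (ht : t ≠ []) (i : Nat) : pvM (pvA t) i i = false := by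
  have hlen := pvA_len ht
  have el : (i : Int) - (i : Int) - 1 = -1 := by omega
  have er : (i : Int) + (i : Int) + 1 = ((2 * i + 1 : Nat) : Int) := by omega
  rw [pvM, el, er, pvA_last ht, PySem.List.pyGet?_natCast]
  rcases Nat.lt_or_ge (2 * i + 1) (pvA t).length with h | h
  · rw [List.getElem?_eq_getElem h]
    have hj : i ≤ t.length := by omega
    have : (pvA t)[2 * i + 1] = '#' := by
      rw [show (pvA t)[2 * i + 1] = (pvA t).getD (2 * i + 1) ' ' by
        rw [List.getD_eq_getElem?_getD, List.getElem?_eq_getElem h]; rfl]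
      exact pvA_odd ht hj
    rw [this]
    rfl
  · rw [List.getElem?_eq_none h]

lemma pvZ_le_self {t : List Char} (ht : t ≠ []) (i : Nat) : pvZ (pvA t) i ≤ i :=
  Nat.find_min' (pvM_ex (pvA t) i) (pvM_self ht i)

-- everything matched below the radius is honestly in range on both sides
lemma pvZ_mem {t : List Char} (ht : t ≠ []) (i : Nat) {k : Nat} (hk : k < pvZ (pvA t) i) :
    i + k + 1 < (pvA t).length ∧
      (pvA t).getD (i - k - 1) ' ' = (pvA t).getD (i + k + 1) ' ' :=
  (pvM_iff (lt_of_lt_of_le hk (pvZ_le_self ht i))).1 (pvZ_lt hk)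

lemma pvZ_add_lt {t : List Char} (ht : t ≠ []) {i : Nat}
    (hi2 : i ≤ 2 * t.length + 1) : i + pvZ (pvA t) i < (pvA t).length := by
  have hlen := pvA_len ht
  rcases Nat.eq_zero_or_pos (pvZ (pvA t) i) with h0 | h0
  · omega
  · have := (pvZ_mem ht i (k := pvZ (pvA t) i - 1) (by omega)).1
    omega

-- ---------- palindrome reflection ----------

lemma pvPal2 {t : List Char} (ht : t ≠ []) {c x y : Nat} (hsum : x + y = 2 * c) (hcy : c ≤ y)
    (hy : y ≤ c + pvZ (pvA t) c) :
    (pvA t).getD x ' ' = (pvA t).getD y ' ' := by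
  rcases Nat.eq_or_lt_of_le hcy with h | h
  · have : x = y := by omega
    rw [this]
  · have hm := (pvZ_mem ht c (k := y - c - 1) (by omega)).2
    have e1 : c - (y - c - 1) - 1 = x := by omega
    have e2 : c + (y - c - 1) + 1 = y := by omega
    rwa [e1, e2] at hm

-- ---------- the mirror seeding is sound ----------

lemma pvMirror {t : List Char} (ht : t ≠ []) {c i m : Nat} (hci : c < i)
    (hi : i ≤ 2 * t.length + 1) (hm : m + i = 2 * c) (hlt : i < c + pvZ (pvA t) c) :
    min (c + pvZ (pvA t) c - i) (pvZ (pvA t) m) ≤ pvZ (pvA t) i := by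
  have hzc := pvZ_le_self ht c
  have hclt := pvZ_add_lt ht (i := c) (by omega)
  have hm1 : 1 ≤ m := by omega
  have hzm := pvZ_le_self ht m
  refine (Nat.le_find_iff (pvM_ex (pvA t) i) _).2 ?_
  intro k hk
  rw [Bool.not_eq_false]
  rw [lt_min_iff] at hk
  obtain ⟨hk1, hk2⟩ := hk
  have hki : k < i := by omega
  rw [pvM_iff hki]
  refine ⟨by omega, ?_⟩
  have hmc := (pvZ_mem ht m hk2).2
  have s1 : (pvA t).getD (m - k - 1) ' ' = (pvA t).getD (i + k + 1) ' ' :=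
    pvPal2 ht (c := c) (by omega) (by omega) (by omega)
  by_cases hc4 : c ≤ i - k - 1
  · have s3 : (pvA t).getD (m + k + 1) ' ' = (pvA t).getD (i - k - 1) ' ' :=
      pvPal2 ht (c := c) (by omega) hc4 (by omega)
    rw [← s3, ← hmc, s1]
  · have s3 : (pvA t).getD (i - k - 1) ' ' = (pvA t).getD (m + k + 1) ' ' :=
      pvPal2 ht (c := c) (by omega) (by omega) (by omega)
    rw [s3, ← hmc, s1]

-- ---------- the two expansion loops compute pvZ ----------

lemma pvExpandA_eq {a : List Char} {i : Nat} :
    ∀ fuel v, v ≤ pvZ a i → pvZ a i - v < fuel →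
      pvExpandA a (i : Int) fuel (v : Int) = (pvZ a i : Int) := by
  intro fuel
  induction fuel with
  | zero => intro v h1 h2; omega
  | succ fuel ih =>
    intro v h1 h2
    rw [pvExpandA, pvMatch_step,
        show (match PySem.List.pyGet? a ((i : Int) + (v : Int) + 1),
                    PySem.List.pyGet? a ((i : Int) - (v : Int) - 1) with
              | some c1, some c2 => c1 == c2
              | _, _ => false) = pvM a i v from rfl]
    rcases Nat.eq_or_lt_of_le h1 with hv | hv
    · have hM : pvM a i v = false := by rw [hv]; exact pvZ_spec _ _
      rw [hM, if_neg (by simp), hv]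
    · rw [pvZ_lt hv, if_pos rfl,
          show (v : Int) + 1 = ((v + 1 : Nat) : Int) by omega]
      exact ih (v + 1) (by omega) (by omega)

lemma pvExpB_eq {a : List Char} {i : Nat} :
    ∀ fuel v, v ≤ pvZ a i → pvZ a i - v < fuel →
      pvExpB a (i : Int) fuel v = pvZ a i := by
  intro fuel
  induction fuel with
  | zero => intro v h1 h2; omega
  | succ fuel ih =>
    intro v h1 h2
    rw [pvExpB, pvMatch_step,
        show (match PySem.List.pyGet? a ((i : Int) + (v : Int) + 1),
                    PySem.List.pyGet? a ((i : Int) - (v : Int) - 1) with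
              | some c1, some c2 => c1 == c2
              | _, _ => false) = pvM a i v from rfl]
    rcases Nat.eq_or_lt_of_le h1 with hv | hv
    · have hM : pvM a i v = false := by rw [hv]; exact pvZ_spec _ _
      rw [hM, if_neg (by simp), hv]
    · rw [pvZ_lt hv, if_pos rfl]
      exact ih (v + 1) (by omega) (by omega)

-- ---------- loop invariant for A's main loop ----------

def pvInv (t : List Char) (i : Nat) (st : List Int × Int × Int) : Prop :=
  st.1.length = (pvA t).length ∧
  (∀ j : Nat, j < (pvA t).length →
      st.1.getD j 0 = if 1 ≤ j ∧ j ≤ i then (pvZ (pvA t) j : Int) else 0) ∧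
  (if i = 0 then st.2.1 = 0 ∧ st.2.2 = 0
   else ∃ c : Nat, st.2.1 = (c : Int) ∧ 1 ≤ c ∧ c ≤ i ∧
      st.2.2 = ((c + pvZ (pvA t) c : Nat) : Int) ∧
      ∀ j : Nat, 1 ≤ j → j ≤ i → j + pvZ (pvA t) j ≤ c + pvZ (pvA t) c)

lemma pvStep_inv {t : List Char} (ht : t ≠ [])
    {i : Nat} (hi1 : 1 ≤ i) (hi2 : i ≤ 2 * t.length + 1) {st : List Int × Int × Int}
    (h : pvInv t (i - 1) st) : pvInv t i (pvStepA (pvA t) st (i : Int)) := by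
  obtain ⟨z, cc, rr⟩ := st
  obtain ⟨h1, h2, h3⟩ := h
  dsimp only at h1 h2 h3
  have hlen := pvA_len ht
  have hiL : i < (pvA t).length := by omega
  have hzi : i < z.length := by omega
  have hzb := pvZ_le_self ht i
  -- first: the list z1 after the optional mirror seeding, and the computed radius zi
  have key : ∃ z1 : List Int,
      pvStepA (pvA t) (z, cc, rr) (i : Int) =
        (if (i : Int) + (pvZ (pvA t) i : Int) > rr then
          (z1.set i (pvZ (pvA t) i : Int), (i : Int), (i : Int) + (pvZ (pvA t) i : Int))
        else (z1.set i (pvZ (pvA t) i : Int), cc, rr)) ∧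
      z1.length = z.length ∧ (∀ j : Nat, j ≠ i → z1.getD j 0 = z.getD j 0) := by
    by_cases hir : (i : Int) < rr
    · -- mirror seeding: i < right
      have hi1' : i - 1 ≠ 0 := by
        intro h0
        rw [if_pos h0] at h3
        omega
      rw [if_neg hi1'] at h3
      obtain ⟨c, hcc, hc1, hc2, hrr, hmax⟩ := h3
      have hzc := pvZ_le_self ht c
      have hlt : i < c + pvZ (pvA t) c := by rw [hrr] at hir; omega
      have hm : (2 * c - i) + i = 2 * c := by omega
      have hm1 : 1 ≤ 2 * c - i := by omega
      have hm2 : 2 * c - i ≤ i - 1 := by omega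
      have em : 2 * cc - (i : Int) = ((2 * c - i : Nat) : Int) := by rw [hcc]; omega
      have hgm : z.getD (2 * c - i) 0 = (pvZ (pvA t) (2 * c - i) : Int) := by
        rw [h2 _ (by omega), if_pos (by omega)]
      have hseedle := pvMirror ht (by omega) hi2 hm hlt
      have eseed : min (rr - (i : Int)) (pvZ (pvA t) (2 * c - i) : Int) =
          ((min (c + pvZ (pvA t) c - i) (pvZ (pvA t) (2 * c - i)) : Nat) : Int) := by
        rw [hrr]; omega
      refine ⟨z.set i ((min (c + pvZ (pvA t) c - i) (pvZ (pvA t) (2 * c - i)) : Nat) : Int),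
        ?_, by simp, fun j hj => pvGetD_set_ne (fun hij => hj hij.symm)⟩
      rw [pvStepA]
      simp only [if_pos hir, em, PySem.List.pyGetD_natCast, PySem.List.pySetD_natCast]
      rw [show (z.getD (2 * c - i) 0) = (pvZ (pvA t) (2 * c - i) : Int) from hgm, eseed]
      rw [show (z.set i ((min (c + pvZ (pvA t) c - i) (pvZ (pvA t) (2 * c - i)) : Nat) : Int)).getD
            i 0 = ((min (c + pvZ (pvA t) c - i) (pvZ (pvA t) (2 * c - i)) : Nat) : Int) from
          pvGetD_set_self hzi]
      rw [pvExpandA_eq _ _ hseedle (by omega)]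
    · -- no seeding: z1 = z, stored z[i] is 0
      have hg0 : PySem.List.pyGetD z (i : Int) 0 = ((0 : Nat) : Int) := by
        rw [PySem.List.pyGetD_natCast, h2 _ (by omega), if_neg (by omega)]
        rfl
      refine ⟨z, ?_, rfl, fun _ _ => rfl⟩
      rw [pvStepA]
      simp only [if_neg hir]
      rw [hg0, pvExpandA_eq _ _ (by omega) (by omega)]
      simp only [PySem.List.pySetD_natCast]
  obtain ⟨z1, hstep, hz1len, hz1get⟩ := key
  rw [hstep]
  clear hstep
  -- the updated z-array satisfies the table property up to i
  have hz2len : (z1.set i (pvZ (pvA t) i : Int)).length = (pvA t).length := by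
    simp [hz1len, h1]
  have hz2get : ∀ j : Nat, j < (pvA t).length →
      (z1.set i (pvZ (pvA t) i : Int)).getD j 0 =
        if 1 ≤ j ∧ j ≤ i then (pvZ (pvA t) j : Int) else 0 := by
    intro j hj
    by_cases hji : j = i
    · subst hji
      rw [pvGetD_set_self (by omega), if_pos (by omega)]
    · rw [pvGetD_set_ne (fun hij => hji hij.symm), hz1get j hji, h2 j hj]
      by_cases hle : 1 ≤ j ∧ j ≤ i - 1
      · rw [if_pos hle, if_pos (by omega)]
      · rw [if_neg hle, if_neg (by omega)]
  -- the center/right update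
  by_cases hupd : (i : Int) + (pvZ (pvA t) i : Int) > rr
  · rw [if_pos hupd]
    unfold pvInv
    dsimp only
    refine ⟨hz2len, hz2get, ?_⟩
    rw [if_neg (by omega)]
    refine ⟨i, rfl, by omega, le_refl i, by push_cast; ring, ?_⟩
    intro j hj1 hj2
    rcases Nat.lt_or_ge j i with hlt | hge
    · by_cases hi10 : i - 1 = 0
      · omega
      · rw [if_neg hi10] at h3
        obtain ⟨c, hcc, hc1, hc2, hrr, hmax⟩ := h3
        have := hmax j hj1 (by omega)
        rw [hrr] at hupd
        omega
    · have : j = i := by omega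
      subst this
      omega
  · rw [if_neg hupd]
    unfold pvInv
    dsimp only
    refine ⟨hz2len, hz2get, ?_⟩
    have hi10 : i - 1 ≠ 0 := by
      intro h0
      rw [if_pos h0] at h3
      obtain ⟨_, hr0⟩ := h3
      rw [hr0] at hupd
      omega
    rw [if_neg hi10] at h3
    obtain ⟨c, hcc, hc1, hc2, hrr, hmax⟩ := h3
    rw [if_neg (by omega)]
    refine ⟨c, hcc, hc1, by omega, hrr, ?_⟩
    intro j hj1 hj2
    rcases Nat.lt_or_ge j i with hlt | hge
    · exact hmax j hj1 (by omega)
    · have : j = i := by omega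
      subst this
      rw [hrr] at hupd
      omega

lemma pvLoop_inv {t : List Char} (ht : t ≠ []) :
    ∀ i : Nat, i ≤ 2 * t.length + 1 →
      pvInv t i ((PySem.List.pyRange 1 ((i : Int) + 1) 1).foldl (pvStepA (pvA t))
        (List.replicate (pvA t).length 0, 0, 0)) := by
  intro i
  induction i with
  | zero =>
    intro _
    rw [show ((0 : Nat) : Int) + 1 = 1 by norm_num, PySem.List.pyRange_one_eq_nil (le_refl 1),
        List.foldl_nil]
    unfold pvInv
    dsimp only
    refine ⟨by simp, ?_, by simp⟩
    intro j hj
    rw [if_neg (by omega)]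
    simp [List.getD_eq_getElem?_getD, hj]
  | succ i ih =>
    intro hi
    rw [show ((i + 1 : Nat) : Int) + 1 = ((i : Int) + 1) + 1 by push_cast; ring,
        PySem.List.pyRange_one_succ_right (by omega), List.foldl_append, List.foldl_cons,
        List.foldl_nil, show (i : Int) + 1 = ((i + 1 : Nat) : Int) by push_cast; ring]
    exact pvStep_inv ht (by omega) hi (ih (by omega))

-- ---------- the returned slice ----------

lemma pvSlice_step2 (z : List Int) (n : Nat) (hl : z.length = 2 * n + 3) :
    PySem.List.slice? z (some 2) (some (-2)) 2 =
      some ((List.range n).map (fun j => z.getD (2 * j + 2) 0)) := by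
  rw [PySem.List.slice?]
  rw [if_neg (by norm_num)]
  simp only [PySem.List.sliceIndices, hl]
  norm_num
  have hmin : min (2 : Int) (2 * (n : Int) + 3) = 2 := by omega
  have hmax : max (-2 + (2 * (n : Int) + 3)) (0 : Int) = 2 * n + 1 := by omega
  rw [hmin, hmax]
  rcases Nat.eq_zero_or_pos n with rfl | hn
  · norm_num
  · rw [if_pos (by left; push_cast; omega)]
    have hcount : ((2 * (n : Int) + 1 - 2 + 2 - 1) / 2).toNat = n := by
      have e : (2 * (n : Int) + 1 - 2 + 2 - 1) = 2 * n := by ring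
      rw [e, Int.mul_ediv_cancel_left _ (by norm_num)]
      exact Int.toNat_natCast n
    rw [hcount]
    rw [List.filterMap_congr (g := fun k => some (z.getD (2 * k + 2) 0)) ?_]
    · exact List.filterMap_eq_map_iff_forall_eq_some.mpr fun x => congrFun rfl
    · intro k hk
      rw [List.mem_range] at hk
      have e : ((2 : Int) + 2 * (k : Int)).toNat = 2 * k + 2 := by omega
      have hlt : 2 * k + 2 < z.length := by omega
      rw [e]
      show z[2 * k + 2]? = some (z.getD (2 * k + 2) 0)
      rw [List.getElem?_eq_getElem hlt, List.getD_eq_getElem?_getD, List.getElem?_eq_getElem hlt]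
      rfl

-- ---------- assembly ----------

lemma pvManachers_eq {s : String} (ht : s.toList ≠ []) :
    manachers s = (List.range s.toList.length).map
      (fun j => (pvZ (pvA s.toList) (2 * j + 2) : Int)) := by
  obtain ⟨hl1, hl2, -⟩ := pvLoop_inv ht (2 * s.toList.length + 1) (le_refl _)
  show (PySem.List.slice?
      ((PySem.List.pyRange 1 (((pvA s.toList).length : Int) - 1) 1).foldl (pvStepA (pvA s.toList))
        (List.replicate (pvA s.toList).length 0, 0, 0)).1 (some 2) (some (-2)) 2).getD [] = _
  rw [show ((pvA s.toList).length : Int) - 1 = ((2 * s.toList.length + 1 : Nat) : Int) + 1 by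
    rw [pvA_len ht]; push_cast; ring]
  rw [pvSlice_step2 _ s.toList.length (by rw [hl1, pvA_len ht])]
  rw [Option.getD_some]
  apply List.map_congr_left
  intro j hj
  rw [List.mem_range] at hj
  rw [hl2 (2 * j + 2) (by rw [pvA_len ht]; omega), if_pos (by omega)]

lemma pvAlt_eq {s : String} (ht : s.toList ≠ []) :
    manachers_alt s = (List.range s.toList.length).map
      (fun j => (pvZ (pvA s.toList) (2 * j + 2) : Int)) := by
  show (PySem.List.pyRange 2 (((pvA s.toList).length : Int) - 2) 2).map
      (fun i => (pvExpB (pvA s.toList) i ((pvA s.toList).length + 1) 0 : Int)) = _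
  rw [pvA_len ht, PySem.List.pyRange_of_pos 2 _ (by norm_num)]
  have hn : s.toList.length ≠ 0 := fun h => ht (List.eq_nil_of_length_eq_zero h)
  rw [if_pos (by push_cast; omega)]
  have hcount : ((((2 * s.toList.length + 3 : Nat) : Int) - 2 - 2 + 2 - 1) / 2).toNat
      = s.toList.length := by
    have e : (((2 * s.toList.length + 3 : Nat) : Int) - 2 - 2 + 2 - 1)
        = 2 * (s.toList.length : Int) := by push_cast; ring
    rw [e, Int.mul_ediv_cancel_left _ (by norm_num)]
    exact Int.toNat_natCast _
  rw [hcount, List.map_map]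
  apply List.map_congr_left
  intro j hj
  rw [List.mem_range] at hj
  show (pvExpB (pvA s.toList) (2 + 2 * (j : Int)) (2 * s.toList.length + 3 + 1) 0 : Int) = _
  rw [show (2 : Int) + 2 * (j : Int) = ((2 * j + 2 : Nat) : Int) by push_cast; ring]
  rw [pvExpB_eq (i := 2 * j + 2) _ 0 (by omega)
      (by have := pvZ_le_self ht (2 * j + 2); omega)]

-- ===== VERDICT (by name: the statement is the Claim_ definition above) =====
theorem manachers_spec : Claim_equal_manachers := by
  intro s _ _
  unfold Spec_manachers
  by_cases ht : s.toList = []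
  · rw [show manachers s = (PySem.List.slice? ((PySem.List.pyRange 1 (((('@' :: '#' :: pvJoinA s.toList).length : Int)) - 1) 1).foldl (pvStepA ('@' :: '#' :: pvJoinA s.toList)) (List.replicate ('@' :: '#' :: pvJoinA s.toList).length 0, 0, 0)).1 (some 2) (some (-2)) 2).getD [] from rfl,
        show manachers_alt s = (PySem.List.pyRange 2 (((('@' :: '#' :: pvJoinA s.toList).length : Int)) - 2) 2).map (fun i => (pvExpB ('@' :: '#' :: pvJoinA s.toList) i (('@' :: '#' :: pvJoinA s.toList).length + 1) 0 : Int)) from rfl,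
        ht]
    decide
  · rw [pvManachers_eq ht, pvAlt_eq ht]
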